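-- pv_equiv track=rewrite | github.com/ismeglenn/Hope-Can-Work | auto_recommendation.py | build_keyword_map
-- ===== SOURCE A (Python) =====
-- def build_keyword_map(recommendations: list, source_url: str) -> list:
--     """Map each recommendation to a keyword based on its content."""
--     keyword_hints = {
--         "logout":   ["logout", "session invalidat", "sign out"],
--         "admin":    ["admin", "privilege", "superuser", "root"],
--         "delete":   ["delet", "remov"],
--         "cart":     ["cart", "basket", "purchase"],
--         "file":     ["file", "download", "upload", "attachment"],
--         "password": ["password", "credential", "secret"],
--         "role":     ["role", "permission", "access control list", "acl"],
--         "api":      ["api", "endpoint", "service", "microservice"],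
--         "token":    ["token", "jwt", "bearer", "oauth"],
--         "log":      ["log", "audit", "monitor", "alert"],
--     }
--
--     mapped = []
--     used_keywords = set()
--
--     for rec in recommendations:
--         rec_lower = rec.lower()
--         matched_keyword = "default"
--
--         for keyword, hints in keyword_hints.items():
--             if keyword in used_keywords:
--                 continue
--             if any(hint in rec_lower for hint in hints):
--                 matched_keyword = keyword
--                 used_keywords.add(keyword)
--                 break
--
--         # Return only keyword, recommendation, and link (title removed)
--         mapped.append((matched_keyword, rec, source_url))
--
--     # Ensure there's always a default row
--     if not any(m[0] == "default" for m in mapped) and mapped: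
--         last = mapped[-1]
--         mapped[-1] = ("default", last[1], last[2])
--
--     return mapped
-- ===== SOURCE B (Python) =====
-- def build_keyword_map(recommendations: list, source_url: str) -> list:
--     """Map each recommendation to a keyword based on its content."""
--     keyword_hints = {
--         "logout":   ["logout", "session invalidat", "sign out"],
--         "admin":    ["admin", "privilege", "superuser", "root"],
--         "delete":   ["delet", "remov"],
--         "cart":     ["cart", "basket", "purchase"],
--         "file":     ["file", "download", "upload", "attachment"],
--         "password": ["password", "credential", "secret"],
--         "role":     ["role", "permission", "access control list", "acl"],
--         "api":      ["api", "endpoint", "service", "microservice"],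
--         "token":    ["token", "jwt", "bearer", "oauth"],
--         "log":      ["log", "audit", "monitor", "alert"],
--     }
--
--     # Pass 1: for each recommendation, the ordered list of keywords whose
--     # hints occur in it (dict order preserved).
--     table = []
--     for rec in recommendations:
--         rl = rec.lower()
--         table.append([kw for kw, hints in keyword_hints.items()
--                       if any(h in rl for h in hints)])
--
--     # Pass 2: greedy assignment of the first still-unused candidate.
--     used = set()
--     rows = []
--     for rec, cands in zip(recommendations, table):
--         kw = next((c for c in cands if c not in used), "default")
--         if kw != "default":
--             used.add(kw)
--         rows.append((kw, rec, source_url))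
--
--     # Guarantee a default row.
--     if rows and all(r[0] != "default" for r in rows):
--         last = rows[-1]
--         rows = rows[:-1] + [("default", last[1], last[2])]
--     return rows
-- ===== Notes on version B (the rewrite author's own statement) =====
-- stated objective: alternative
-- what changed: Replaces A's single interleaved stateful scan (inner hint loop consulting and mutating the used-set per recommendation) by two separate passes: first build a candidate-keyword table per recommendation, then a greedy pass assigning each recommendation its first still-unused candidate, followed by the same all-default fixup.
import Mathlib
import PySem

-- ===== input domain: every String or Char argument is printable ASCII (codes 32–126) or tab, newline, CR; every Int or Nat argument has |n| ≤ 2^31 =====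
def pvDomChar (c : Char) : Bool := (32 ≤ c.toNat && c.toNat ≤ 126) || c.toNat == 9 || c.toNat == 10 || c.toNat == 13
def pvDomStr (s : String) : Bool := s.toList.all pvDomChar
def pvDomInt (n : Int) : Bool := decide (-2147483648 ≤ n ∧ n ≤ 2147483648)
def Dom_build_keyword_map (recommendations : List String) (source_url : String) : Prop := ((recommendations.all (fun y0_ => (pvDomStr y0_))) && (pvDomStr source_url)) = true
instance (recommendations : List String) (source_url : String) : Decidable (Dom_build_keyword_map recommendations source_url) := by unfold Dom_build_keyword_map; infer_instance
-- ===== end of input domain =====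

-- B replaces A's interleaved stateful scan by a candidate-table pass plus a
-- separate greedy-assignment pass (alternative decomposition, same cost).

-- the keyword_hints dict, in insertion order (shared literal data of both programs)
def pvHints : List (String × List String) :=
  [ ("logout",   ["logout", "session invalidat", "sign out"]),
    ("admin",    ["admin", "privilege", "superuser", "root"]),
    ("delete",   ["delet", "remov"]),
    ("cart",     ["cart", "basket", "purchase"]),
    ("file",     ["file", "download", "upload", "attachment"]),
    ("password", ["password", "credential", "secret"]),
    ("role",     ["role", "permission", "access control list", "acl"]),
    ("api",      ["api", "endpoint", "service", "microservice"]),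
    ("token",    ["token", "jwt", "bearer", "oauth"]),
    ("log",      ["log", "audit", "monitor", "alert"]) ]

-- ===== PORT A =====
-- A's inner 'for keyword, hints in keyword_hints.items(): … break' loop:
-- returns the matched keyword (or "default") and the updated used set.
def pvMatchA : List (String × List String) → PySem.Set String → String → String × PySem.Set String
  | [], used, _ => ("default", used)
  | (kw, hints) :: rest, used, recLower =>
    if PySem.Set.contains used kw then pvMatchA rest used recLower
    else if hints.any (fun h => PySem.Str.isIn h recLower) then (kw, PySem.Set.add used kw)
    else pvMatchA rest used recLower

-- A's outer 'for rec in recommendations' loop building mapped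
def pvLoopA : List String → PySem.Set String → String → List (String × String × String)
  | [], _, _ => []
  | rec :: rest, used, url =>
    let r := pvMatchA pvHints used (PySem.Str.lower rec)
    (r.1, rec, url) :: pvLoopA rest r.2 url

-- A's final 'ensure there's always a default row' rewrite of mapped[-1]
def pvFixA (mapped : List (String × String × String)) : List (String × String × String) :=
  if (mapped.any (fun m => m.1 == "default")) = false ∧ mapped ≠ [] then
    match mapped.getLast? with
    | some last => mapped.dropLast ++ [("default", last.2.1, last.2.2)]
    | none => mapped
  else mapped

def build_keyword_map (recommendations : List String) (source_url : String) : List (String × String × String) :=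
  pvFixA (pvLoopA recommendations PySem.Set.empty source_url)

-- ===== PORT B =====
-- pass 1: ordered candidate keywords of one recommendation (dict order)
def pvCands (recLower : String) : List String :=
  pvHints.filterMap (fun p => if p.2.any (fun h => PySem.Str.isIn h recLower) then some p.1 else none)

-- next((c for c in cands if c not in used), "default")
def pvPick : List String → PySem.Set String → String
  | [], _ => "default"
  | c :: cs, used => if PySem.Set.contains used c then pvPick cs used else c

-- pass 2: greedy assignment over the (rec, candidates) table
def pvAssign : List (String × List String) → PySem.Set String → String → List (String × String × String)
  | [], _, _ => []
  | (rec, cands) :: rest, used, url =>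
    let kw := pvPick cands used
    let used' := if kw == "default" then used else PySem.Set.add used kw
    (kw, rec, url) :: pvAssign rest used' url

-- B's fixup: 'if rows and all(r[0] != "default" for r in rows)'
def pvFixB (rows : List (String × String × String)) : List (String × String × String) :=
  if rows ≠ [] ∧ rows.all (fun r => r.1 != "default") then
    match rows.getLast? with
    | some last => rows.dropLast ++ [("default", last.2.1, last.2.2)]
    | none => rows
  else rows

def build_keyword_map_alt (recommendations : List String) (source_url : String) : List (String × String × String) :=
  let table := recommendations.map (fun rec => (rec, pvCands (PySem.Str.lower rec)))
  pvFixB (pvAssign table PySem.Set.empty source_url)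

-- ===== PRECONDITION & SPEC =====
def Spec_build_keyword_map (recommendations : List String) (source_url : String) (out : List (String × String × String)) : Prop := out = build_keyword_map_alt recommendations source_url
instance (recommendations : List String) (source_url : String) (out : List (String × String × String)) : Decidable (Spec_build_keyword_map recommendations source_url out) := by unfold Spec_build_keyword_map; infer_instance

-- ===== CLAIM (what is proved, stated in full; the proofs are below) =====
def Claim_equal_build_keyword_map : Prop := ∀ (recommendations : List String) (source_url : String), Dom_build_keyword_map recommendations source_url → Spec_build_keyword_map recommendations source_url (build_keyword_map recommendations source_url)

-- ===== LEMMAS AND PROOFS =====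

-- generic candidate list of a hint table
def pvCandsOf (hs : List (String × List String)) (recLower : String) : List String :=
  hs.filterMap (fun p => if p.2.any (fun h => PySem.Str.isIn h recLower) then some p.1 else none)

lemma pvCands_eq (rl : String) : pvCands rl = pvCandsOf pvHints rl := rfl

-- candidate list of a cons hint row
lemma pvCandsOf_cons (kw : String) (hints : List String) (rest : List (String × List String)) (rl : String) :
    pvCandsOf ((kw, hints) :: rest) rl =
      if hints.any (fun h => PySem.Str.isIn h rl) then kw :: pvCandsOf rest rl
      else pvCandsOf rest rl := by
  unfold pvCandsOf
  rw [List.filterMap_cons]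
  cases hm : hints.any (fun h => PySem.Str.isIn h rl) <;> simp

lemma pvPick_cons (c : String) (cs : List String) (used : PySem.Set String) :
    pvPick (c :: cs) used = if PySem.Set.contains used c then pvPick cs used else c := rfl

-- A's break-search equals pick-first-unused over the candidate list,
-- provided no key of the table is the sentinel "default".
lemma pvMatchA_eq_pick (hs : List (String × List String)) (used : PySem.Set String)
    (rl : String) (hnd : ∀ p ∈ hs, p.1 ≠ "default") :
    pvMatchA hs used rl =
      (pvPick (pvCandsOf hs rl) used,
       if pvPick (pvCandsOf hs rl) used == "default" then used
       else PySem.Set.add used (pvPick (pvCandsOf hs rl) used)) := by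
  induction hs with
  | nil => rfl
  | cons p rest ih =>
    obtain ⟨kw, hints⟩ := p
    have hkw : (kw == "default") = false := by
      have h := hnd (kw, hints) List.mem_cons_self
      simpa using h
    have ih' := ih (fun q hq => hnd q (List.mem_cons_of_mem _ hq))
    rw [pvCandsOf_cons]
    show (if PySem.Set.contains used kw = true then pvMatchA rest used rl
          else if (hints.any fun h => PySem.Str.isIn h rl) = true then (kw, PySem.Set.add used kw)
          else pvMatchA rest used rl) = _
    cases hu : PySem.Set.contains used kw with
    | false =>
      rw [if_neg (by simp)]
      cases hm : (hints.any fun h => PySem.Str.isIn h rl) with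
      | false => rw [if_neg (by simp), if_neg (by simp)]; exact ih'
      | true =>
        rw [if_pos rfl, if_pos rfl, pvPick_cons, hu, if_neg (by simp), hkw, if_neg (by simp)]
    | true =>
      rw [if_pos rfl]
      cases hm : (hints.any fun h => PySem.Str.isIn h rl) with
      | false => rw [if_neg (by simp)]; exact ih'
      | true => rw [if_pos rfl, pvPick_cons, hu, if_pos rfl]; exact ih'

lemma pvHints_no_default : ∀ p ∈ pvHints, p.1 ≠ "default" := by decide

-- the two scans agree for every starting used set
lemma pvLoopA_eq_pvAssign (recs : List String) (used : PySem.Set String) (url : String) :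
    pvLoopA recs used url =
      pvAssign (recs.map (fun rec => (rec, pvCands (PySem.Str.lower rec)))) used url := by
  induction recs generalizing used with
  | nil => simp [pvLoopA, pvAssign]
  | cons rec rest ih =>
    simp only [pvLoopA, List.map_cons, pvAssign]
    rw [pvMatchA_eq_pick pvHints used (PySem.Str.lower rec) pvHints_no_default, pvCands_eq]
    exact congrArg _ (ih _)

-- the two fixups are the same condition written with any vs all
lemma pvFixA_eq_pvFixB (m : List (String × String × String)) : pvFixA m = pvFixB m := by
  unfold pvFixA pvFixB
  have h : ((m.any (fun r => r.1 == "default")) = false ∧ m ≠ []) ↔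
      (m ≠ [] ∧ m.all (fun r => r.1 != "default")) := by
    constructor
    · rintro ⟨ha, hne⟩
      refine ⟨hne, ?_⟩
      simp only [List.all_eq_true]
      intro r hr
      have := (List.any_eq_false).mp ha r hr
      simpa using this
    · rintro ⟨hne, ha⟩
      refine ⟨?_, hne⟩
      simp only [List.any_eq_false]
      intro r hr
      have := (List.all_eq_true).mp ha r hr
      simpa using this
  by_cases hc : (m.any (fun r => r.1 == "default")) = false ∧ m ≠ []
  · rw [if_pos hc, if_pos (h.mp hc)]
  · rw [if_neg hc, if_neg (fun hb => hc (h.mpr hb))]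

-- ===== VERDICT (by name: the statement is the Claim_ definition above) =====
theorem build_keyword_map_spec : Claim_equal_build_keyword_map := by
  intro recs url _
  unfold Spec_build_keyword_map build_keyword_map build_keyword_map_alt
  rw [pvLoopA_eq_pvAssign, pvFixA_eq_pvFixB]
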